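-- pv_equiv track=rewrite | github.com/deepdoctection/deepdoctection | deepdoctection/pipe/refine.py | _html_row
-- ===== SOURCE A (Python) =====
-- from typing import DefaultDict, Optional, Sequence, Union
--
-- def _html_cell(
--     cell_position: Union[tuple[int, int, int, int], tuple[()]], position_filled_list: list[tuple[int, int]]
-- ) -> list[str]:
--     """
--     Generates an HTML table cell string.
--
--     Args:
--         cell_position: Cell position tuple or empty tuple.
--         position_filled_list: List of filled positions.
--
--     Returns:
--         List of HTML strings representing the cell.
--     """
--     html = ["<td"]
--     if not cell_position:
--         pass
--     else:
--         if cell_position[2] != 1: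
--             html.append(f" rowspan={cell_position[2]}")
--         if cell_position[3] != 1:
--             html.append(f" colspan={cell_position[3]}")
--         if cell_position[2] != 1 or cell_position[3] != 1:
--             position_filled_list.extend(
--                 [
--                     (cell_position[0] + h_shift, cell_position[1] + v_shift)
--                     for h_shift in range(cell_position[2])
--                     for v_shift in range(cell_position[3])
--                 ]
--             )
--     html.append(">")
--     str_html = "".join(html)
--     html_list = [str_html, "</td>"]
--     return html_list
--
-- def _html_row(
--     row_list: list[tuple[int, int, int, int]],
--     position_filled_list: list[tuple[int, int]],
--     this_row: int,
--     number_of_cols: int,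
--     row_ann_id_list: list[str],
-- ) -> list[str]:
--     """
--     Generates an HTML table row string.
--
--     Args:
--         row_list: List of cell position tuples for the row.
--         position_filled_list: List of filled positions.
--         this_row: The current row number.
--         number_of_cols: The total number of columns.
--         row_ann_id_list: List of annotation ids for the row.
--
--     Returns:
--         List of HTML strings representing the row.
--     """
--     html = ["<tr>"]
--     for idx in range(1, number_of_cols + 1):
--         position_filled_this_row = list(filter(lambda x: x[0] == this_row, position_filled_list))
--         column_filled_this_row = list(zip(*position_filled_this_row))
--         column_filled_this_row = (
--             [column_filled_this_row, column_filled_this_row]  # type:ignore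
--             if not column_filled_this_row
--             else column_filled_this_row
--         )
--         if idx in column_filled_this_row[1]:
--             pass
--         else:
--             cell_position_list = list(filter(lambda x: x[1] == idx, row_list))  # pylint:disable=W0640
--
--             if cell_position_list:
--                 cell_position = cell_position_list[0]
--                 cell_id = row_ann_id_list.pop(0)
--                 ret_html = _html_cell(cell_position, position_filled_list)
--                 ret_html.insert(1, cell_id)
--             else:
--                 cell_position = ()  # type: ignore
--                 ret_html = _html_cell(cell_position, position_filled_list)
--             html.extend(ret_html)
--     html.append("</tr>")
--     return html
-- ===== SOURCE B (Python) =====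
-- def _html_row(row_list, position_filled_list, this_row, number_of_cols, row_ann_id_list):
--     # Single pass: incrementally maintained filled-column set + dict column -> first cell.
--     # NOTE: unlike A, B does not mutate position_filled_list / row_ann_id_list in place;
--     # the equivalence is about the return value only.  Where A raises IndexError
--     # (too few ids), B raises StopIteration at the same point.
--     filled = {c for r, c in position_filled_list if r == this_row}
--     first_cell = {}
--     for cell in row_list:
--         if cell[1] not in first_cell:
--             first_cell[cell[1]] = cell
--     ids = iter(row_ann_id_list)
--     html = ["<tr>"]
--     for idx in range(1, number_of_cols + 1):
--         if idx in filled: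
--             continue
--         cell = first_cell.get(idx)
--         if cell is None:
--             html.extend(["<td>", "</td>"])
--         else:
--             r, c, rs, cs = cell
--             td = "<td"
--             if rs != 1:
--                 td += f" rowspan={rs}"
--             if cs != 1:
--                 td += f" colspan={cs}"
--             html.extend([td + ">", next(ids), "</td>"])
--             if (rs != 1 or cs != 1) and r <= this_row < r + rs:
--                 filled.update(range(c, c + cs))
--     html.append("</tr>")
--     return html
-- ===== Notes on version B (the rewrite author's own statement) =====
-- stated objective: faster
-- what changed: Replaces A's per-column rescans (re-filtering position_filled_list and row_list for every column index) with one pass that maintains the filled-column set for this_row incrementally and a column->first-cell dict built once; B also does not mutate position_filled_list/row_ann_id_list in place (return value only).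
import Mathlib
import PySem

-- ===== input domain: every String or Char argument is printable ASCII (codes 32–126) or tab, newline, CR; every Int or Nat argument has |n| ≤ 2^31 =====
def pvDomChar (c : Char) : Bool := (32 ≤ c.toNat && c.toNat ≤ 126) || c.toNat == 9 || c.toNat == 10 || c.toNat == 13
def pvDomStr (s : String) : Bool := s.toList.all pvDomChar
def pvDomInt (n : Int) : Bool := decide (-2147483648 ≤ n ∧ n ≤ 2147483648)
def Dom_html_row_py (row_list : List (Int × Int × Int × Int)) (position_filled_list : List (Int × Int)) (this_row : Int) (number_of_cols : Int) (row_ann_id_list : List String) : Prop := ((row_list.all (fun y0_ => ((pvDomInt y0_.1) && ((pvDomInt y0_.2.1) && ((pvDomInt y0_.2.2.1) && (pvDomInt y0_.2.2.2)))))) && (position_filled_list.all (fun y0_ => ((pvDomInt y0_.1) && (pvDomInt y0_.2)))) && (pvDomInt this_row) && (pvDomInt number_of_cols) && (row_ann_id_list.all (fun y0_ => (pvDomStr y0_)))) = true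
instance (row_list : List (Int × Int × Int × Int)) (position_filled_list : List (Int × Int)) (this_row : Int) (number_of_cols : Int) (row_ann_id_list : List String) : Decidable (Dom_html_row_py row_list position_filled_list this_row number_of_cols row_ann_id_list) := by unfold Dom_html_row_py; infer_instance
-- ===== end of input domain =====

-- B replaces A's per-column rescans of position_filled_list/row_list by an incrementally
-- maintained filled-column set and a column->first-cell dict built once (single pass).
-- A mutates position_filled_list and row_ann_id_list in place, B does not: the
-- equivalence claimed here is about the RETURN value only.

-- ===== PORT A =====
-- _html_cell: returns (html fragment, updated position_filled_list)
def pyHtmlCell (cell_position : Option (Int × Int × Int × Int))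
    (position_filled_list : List (Int × Int)) : List String × List (Int × Int) :=
  match cell_position with
  | none =>
      (PySem.Str.join "" (["<td"] ++ [">"]) :: ["</td>"], position_filled_list)
  | some (r0, c0, rs, cs) =>
      let html := ["<td"]
      let html := if rs ≠ 1 then html ++ [" rowspan=" ++ PySem.Int.toStr rs] else html
      let html := if cs ≠ 1 then html ++ [" colspan=" ++ PySem.Int.toStr cs] else html
      let pos :=
        if rs ≠ 1 ∨ cs ≠ 1 then
          position_filled_list ++
            (PySem.List.pyRange 0 rs 1).flatMap
              (fun h => (PySem.List.pyRange 0 cs 1).map (fun v => (r0 + h, c0 + v)))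
        else position_filled_list
      let html := html ++ [">"]
      (PySem.Str.join "" html :: ["</td>"], pos)

-- one iteration of A's 'for idx in range(1, number_of_cols + 1)' loop;
-- state = (html, position_filled_list, row_ann_id_list)
def pyRowStep (row_list : List (Int × Int × Int × Int)) (this_row : Int)
    (st : List String × List (Int × Int) × List String) (idx : Int) :
    List String × List (Int × Int) × List String :=
  let position_filled_this_row := st.2.1.filter (fun x => x.1 == this_row)
  -- list(zip(*…))[1]: the tuple of second components (the [[],[]] guard makes it [] when the filter is empty)
  let column_filled_this_row := position_filled_this_row.map (·.2)
  if idx ∈ column_filled_this_row then (st.1, st.2.1, st.2.2)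
  else
    match row_list.filter (fun x => x.2.1 == idx) with
    | cell :: _ =>
        let cell_id := st.2.2.headD ""   -- row_ann_id_list.pop(0); pop of [] = IndexError, excluded by Pre_
        let r := pyHtmlCell (some cell) st.2.1
        (st.1 ++ PySem.List.insert r.1 1 cell_id, r.2, st.2.2.tail)
    | [] =>
        let r := pyHtmlCell none st.2.1
        (st.1 ++ r.1, r.2, st.2.2)

def html_row_py (row_list : List (Int × Int × Int × Int)) (position_filled_list : List (Int × Int)) (this_row : Int) (number_of_cols : Int) (row_ann_id_list : List String) : List String :=
  let st := (PySem.List.pyRange 1 (number_of_cols + 1) 1).foldl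
      (pyRowStep row_list this_row) (["<tr>"], position_filled_list, row_ann_id_list)
  st.1 ++ ["</tr>"]

-- ===== PORT B =====
-- first_cell: dict column -> first cell of row_list with that column
def altFirstCell (row_list : List (Int × Int × Int × Int)) :
    PySem.Dict Int (Int × Int × Int × Int) :=
  row_list.foldl
    (fun d cell => if d.contains cell.2.1 then d else d.insert cell.2.1 cell)
    PySem.Dict.empty

-- one iteration of B's single pass; state = (html, filled set, remaining ids iterator)
def altStep (first_cell : PySem.Dict Int (Int × Int × Int × Int)) (this_row : Int)
    (st : List String × PySem.Set Int × List String) (idx : Int) :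
    List String × PySem.Set Int × List String :=
  if idx ∈ st.2.1 then st
  else
    match first_cell.get? idx with
    | none => (st.1 ++ ["<td>", "</td>"], st.2.1, st.2.2)
    | some (r0, c0, rs, cs) =>
        let td := "<td"
        let td := if rs ≠ 1 then td ++ (" rowspan=" ++ PySem.Int.toStr rs) else td
        let td := if cs ≠ 1 then td ++ (" colspan=" ++ PySem.Int.toStr cs) else td
        -- next(ids): st.2.2.headD "" / tail; StopIteration on [] is excluded by Pre_
        let html := st.1 ++ [td ++ ">", st.2.2.headD "", "</td>"]
        let filled :=
          if (rs ≠ 1 ∨ cs ≠ 1) ∧ r0 ≤ this_row ∧ this_row < r0 + rs then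
            PySem.Set.update st.2.1 (PySem.List.pyRange c0 (c0 + cs) 1)
          else st.2.1
        (html, filled, st.2.2.tail)

def html_row_py_alt (row_list : List (Int × Int × Int × Int)) (position_filled_list : List (Int × Int)) (this_row : Int) (number_of_cols : Int) (row_ann_id_list : List String) : List String :=
  let filled : PySem.Set Int :=
    PySem.Set.ofList ((position_filled_list.filter (fun p => p.1 == this_row)).map (·.2))
  let st := (PySem.List.pyRange 1 (number_of_cols + 1) 1).foldl
      (altStep (altFirstCell row_list) this_row) (["<tr>"], filled, row_ann_id_list)
  st.1 ++ ["</tr>"]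

-- ===== PRECONDITION & SPEC =====
-- pvRowIdsNeeded: the number of annotation ids the row consumes — one per column
-- 1..number_of_cols that is not filled (initially from position_filled_list, then by the
-- columns a spanning cell covering this_row fills) and is matched by a cell of row_list.
-- (only the matched columns, in increasing order, can consume an id; filled columns are
-- kept as half-open intervals [lo, hi) — nothing of size number_of_cols is materialized)
def pvRowIdsNeeded (row_list : List (Int × Int × Int × Int))
    (position_filled_list : List (Int × Int)) (this_row number_of_cols : Int) : Int :=
  let cols : List Int :=
    (((row_list.map (fun x => x.2.1)).filter
        (fun c => decide (1 ≤ c) && decide (c ≤ number_of_cols))).dedup).insertionSort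
      (fun a b => decide (a ≤ b))
  (cols.foldl
    (fun (st : List (Int × Int) × Int) idx =>
      if st.1.any (fun p => decide (p.1 ≤ idx) && decide (idx < p.2)) then st
      else
        match (row_list.filter (fun x => x.2.1 == idx)).head? with
        | none => st
        | some (r0, c0, rs, cs) =>
            ((if (rs ≠ 1 ∨ cs ≠ 1) ∧ r0 ≤ this_row ∧ this_row < r0 + rs then
                (c0, c0 + cs) :: st.1
              else st.1), st.2 + 1))
    ((position_filled_list.filter (fun p => p.1 == this_row)).map (fun p => (p.2, p.2 + 1)),
      (0 : Int))).2

-- Pre_ excludes EXACTLY the inputs on which the Python A raises IndexError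
-- (row_ann_id_list.pop(0) on an exhausted list): those where the row consumes more ids
-- than row_ann_id_list provides (B raises StopIteration at the same point there).
def Pre_html_row_py (row_list : List (Int × Int × Int × Int)) (position_filled_list : List (Int × Int)) (this_row : Int) (number_of_cols : Int) (row_ann_id_list : List String) : Prop :=
  pvRowIdsNeeded row_list position_filled_list this_row number_of_cols
    ≤ PySem.List.len row_ann_id_list
instance (row_list : List (Int × Int × Int × Int)) (position_filled_list : List (Int × Int)) (this_row : Int) (number_of_cols : Int) (row_ann_id_list : List String) : Decidable (Pre_html_row_py row_list position_filled_list this_row number_of_cols row_ann_id_list) := by unfold Pre_html_row_py; infer_instance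

def pvWitness_html_row_py : (List (Int × Int × Int × Int)) × (List (Int × Int)) × Int × Int × List String :=
  ([(0, 1, 1, 1)], [], 0, 1, ["a"])

def Spec_html_row_py (row_list : List (Int × Int × Int × Int)) (position_filled_list : List (Int × Int)) (this_row : Int) (number_of_cols : Int) (row_ann_id_list : List String) (out : List String) : Prop := out = html_row_py_alt row_list position_filled_list this_row number_of_cols row_ann_id_list
instance (row_list : List (Int × Int × Int × Int)) (position_filled_list : List (Int × Int)) (this_row : Int) (number_of_cols : Int) (row_ann_id_list : List String) (out : List String) : Decidable (Spec_html_row_py row_list position_filled_list this_row number_of_cols row_ann_id_list out) := by unfold Spec_html_row_py; infer_instance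

-- ===== CLAIM (what is proved, stated in full; the proofs are below) =====
def Claim_equal_html_row_py : Prop := ∀ (row_list : List (Int × Int × Int × Int)) (position_filled_list : List (Int × Int)) (this_row : Int) (number_of_cols : Int) (row_ann_id_list : List String), Dom_html_row_py row_list position_filled_list this_row number_of_cols row_ann_id_list → Pre_html_row_py row_list position_filled_list this_row number_of_cols row_ann_id_list → Spec_html_row_py row_list position_filled_list this_row number_of_cols row_ann_id_list (html_row_py row_list position_filled_list this_row number_of_cols row_ann_id_list)

-- ===== LEMMAS AND PROOFS =====

lemma join2 (a b : String) : PySem.Str.join "" [a, b] = a ++ b := by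
  simp [PySem.Str.join, PySem.Chars.join, List.intercalate, String.ofList_append,
    String.ofList_toList]

lemma join3 (a b c : String) : PySem.Str.join "" [a, b, c] = (a ++ b) ++ c := by
  simp [PySem.Str.join, PySem.Chars.join, List.intercalate, String.ofList_append,
    String.ofList_toList, String.append_assoc]

lemma join4 (a b c d : String) : PySem.Str.join "" [a, b, c, d] = ((a ++ b) ++ c) ++ d := by
  simp [PySem.Str.join, PySem.Chars.join, List.intercalate, String.ofList_append,
    String.ofList_toList, String.append_assoc]

-- B's dict lookup is A's first match in row_list
lemma firstCell_foldl_get? (idx : Int) :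
    ∀ (l : List (Int × Int × Int × Int)) (d : PySem.Dict Int (Int × Int × Int × Int)),
      (l.foldl (fun d cell => if d.contains cell.2.1 then d else d.insert cell.2.1 cell) d).get? idx
        = (d.get? idx).or ((l.filter (fun x => x.2.1 == idx)).head?) := by
  intro l
  induction l with
  | nil => intro d; simp
  | cons c t ih =>
      intro d
      simp only [List.foldl_cons, List.filter_cons]
      by_cases hd : d.contains c.2.1
      · rw [if_pos hd, ih]
        by_cases hc : c.2.1 = idx
        · have hs : (d.get? idx).isSome := by
            rw [PySem.Dict.contains_eq_isSome_get?] at hd; rwa [hc] at hd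
          obtain ⟨v, hv⟩ := Option.isSome_iff_exists.mp hs
          simp [hv, hc]
        · have hbeq : (c.2.1 == idx) = false := by simpa using hc
          simp [hbeq]
      · rw [if_neg hd, ih]
        by_cases hc : c.2.1 = idx
        · have h1 : (d.insert c.2.1 c).get? idx = some c := by
            rw [hc]; exact PySem.Dict.get?_insert_self d idx c
          have h2 : d.get? idx = none := by
            rw [PySem.Dict.contains_eq_isSome_get?] at hd; rw [hc] at hd; simpa using hd
          simp [h2, hc]
        · have hbeq : (c.2.1 == idx) = false := by simpa using hc
          rw [PySem.Dict.get?_insert_of_ne d c (fun h => hc h.symm)]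
          simp [hbeq]

lemma firstCell_get? (row_list : List (Int × Int × Int × Int)) (idx : Int) :
    (altFirstCell row_list).get? idx = (row_list.filter (fun x => x.2.1 == idx)).head? := by
  unfold altFirstCell
  rw [firstCell_foldl_get?]
  simp

-- membership in the positions a spanning cell appends, restricted to this_row
lemma mem_ext_iff (r0 c0 rs cs this_row j : Int) :
    (j ∈ (((PySem.List.pyRange 0 rs 1).flatMap
        (fun h => (PySem.List.pyRange 0 cs 1).map (fun v => (r0 + h, c0 + v)))).filter
          (fun x => x.1 == this_row)).map (·.2))
      ↔ (r0 ≤ this_row ∧ this_row < r0 + rs) ∧ (c0 ≤ j ∧ j < c0 + cs) := by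
  simp only [List.mem_map, List.mem_filter, List.mem_flatMap, PySem.List.mem_pyRange_one]
  constructor
  · rintro ⟨⟨a, b⟩, ⟨⟨h, ⟨hh1, hh2⟩, v, ⟨hv1, hv2⟩, heq⟩, hrow⟩, hsnd⟩
    simp only [Prod.mk.injEq] at heq
    obtain ⟨he1, he2⟩ := heq
    simp only at hsnd hrow
    have hrow' : a = this_row := by simpa using hrow
    omega
  · rintro ⟨⟨hr1, hr2⟩, hc1, hc2⟩
    exact ⟨(this_row, j), ⟨⟨this_row - r0, ⟨by omega, by omega⟩, j - c0, ⟨by omega, by omega⟩,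
      by simp only [Prod.mk.injEq]; constructor <;> omega⟩, by simp⟩, rfl⟩

-- the HTML cell string built by A's join equals B's incremental concatenation
lemma cellStr (rs cs : Int) :
    PySem.Str.join ""
      (((if cs ≠ 1 then
            (if rs ≠ 1 then ["<td"] ++ [" rowspan=" ++ PySem.Int.toStr rs] else ["<td"])
              ++ [" colspan=" ++ PySem.Int.toStr cs]
          else (if rs ≠ 1 then ["<td"] ++ [" rowspan=" ++ PySem.Int.toStr rs] else ["<td"])))
        ++ [">"])
      = (if cs ≠ 1 then
            (if rs ≠ 1 then "<td" ++ (" rowspan=" ++ PySem.Int.toStr rs) else "<td")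
              ++ (" colspan=" ++ PySem.Int.toStr cs)
          else (if rs ≠ 1 then "<td" ++ (" rowspan=" ++ PySem.Int.toStr rs) else "<td")) ++ ">" := by
  split_ifs with h1 h2 h3
  · exact join4 _ _ _ _
  · exact join3 _ _ _
  · exact join3 _ _ _
  · exact join2 _ _

-- the two loops agree on the html component whenever the filled set mirrors
-- the filled columns of this_row recorded in position_filled_list
lemma loop_agree (row_list : List (Int × Int × Int × Int)) (this_row : Int) :
    ∀ (idxs : List Int) (html : List String) (pos : List (Int × Int))
      (filled : PySem.Set Int) (ids : List String),
      (∀ j : Int, j ∈ filled ↔ j ∈ (pos.filter (fun x => x.1 == this_row)).map (·.2)) →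
      (idxs.foldl (pyRowStep row_list this_row) (html, pos, ids)).1
        = (idxs.foldl (altStep (altFirstCell row_list) this_row) (html, filled, ids)).1 := by
  intro idxs
  induction idxs with
  | nil => intro html pos filled ids _; rfl
  | cons idx rest ih =>
      intro html pos filled ids hinv
      simp only [List.foldl_cons]
      by_cases hmem : idx ∈ (pos.filter (fun x => x.1 == this_row)).map (·.2)
      · rw [show pyRowStep row_list this_row (html, pos, ids) idx = (html, pos, ids) by
            simp only [pyRowStep]; rw [if_pos hmem],
          show altStep (altFirstCell row_list) this_row (html, filled, ids) idx
              = (html, filled, ids) by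
            simp only [altStep]; rw [if_pos ((hinv idx).mpr hmem)]]
        exact ih html pos filled ids hinv
      · have hmem' : idx ∉ filled := fun h => hmem ((hinv idx).mp h)
        cases hcell : row_list.filter (fun x => x.2.1 == idx) with
        | nil =>
            rw [show pyRowStep row_list this_row (html, pos, ids) idx
                  = (html ++ ["<td>", "</td>"], pos, ids) by
                simp only [pyRowStep]; rw [if_neg hmem, hcell]
                simp only [pyHtmlCell]
                rw [show (["<td"] ++ [">"] : List String) = ["<td", ">"] from rfl, join2]
                rfl,
              show altStep (altFirstCell row_list) this_row (html, filled, ids) idx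
                  = (html ++ ["<td>", "</td>"], filled, ids) by
                simp only [altStep]; rw [if_neg hmem', firstCell_get?, hcell]; rfl]
            exact ih _ pos filled ids hinv
        | cons cell tl =>
            obtain ⟨r0, c0, rs, cs⟩ := cell
            have hA : pyRowStep row_list this_row (html, pos, ids) idx
                = (html ++
                    [(if cs ≠ 1 then
                        (if rs ≠ 1 then "<td" ++ (" rowspan=" ++ PySem.Int.toStr rs) else "<td")
                          ++ (" colspan=" ++ PySem.Int.toStr cs)
                      else (if rs ≠ 1 then "<td" ++ (" rowspan=" ++ PySem.Int.toStr rs) else "<td"))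
                      ++ ">", ids.headD "", "</td>"],
                    (if rs ≠ 1 ∨ cs ≠ 1 then
                      pos ++ (PySem.List.pyRange 0 rs 1).flatMap
                        (fun h => (PySem.List.pyRange 0 cs 1).map (fun v => (r0 + h, c0 + v)))
                    else pos),
                    ids.tail) := by
              simp only [pyRowStep]
              rw [if_neg hmem, hcell]
              simp only [pyHtmlCell, cellStr]
              rw [PySem.List.insert_ofNat _ 1 _ (by simp)]
              rfl
            have hB : altStep (altFirstCell row_list) this_row (html, filled, ids) idx
                = (html ++
                    [(if cs ≠ 1 then
                        (if rs ≠ 1 then "<td" ++ (" rowspan=" ++ PySem.Int.toStr rs) else "<td")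
                          ++ (" colspan=" ++ PySem.Int.toStr cs)
                      else (if rs ≠ 1 then "<td" ++ (" rowspan=" ++ PySem.Int.toStr rs) else "<td"))
                      ++ ">", ids.headD "", "</td>"],
                    (if (rs ≠ 1 ∨ cs ≠ 1) ∧ r0 ≤ this_row ∧ this_row < r0 + rs then
                      PySem.Set.update filled (PySem.List.pyRange c0 (c0 + cs) 1)
                    else filled),
                    ids.tail) := by
              simp only [altStep]
              rw [if_neg hmem', firstCell_get?, hcell]
              rfl
            rw [hA, hB]
            apply ih
            intro j
            by_cases hspan : rs ≠ 1 ∨ cs ≠ 1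
            · rw [if_pos hspan]
              by_cases hcov : r0 ≤ this_row ∧ this_row < r0 + rs
              · rw [if_pos ⟨hspan, hcov⟩]
                rw [PySem.Set.mem_update, List.filter_append, List.map_append,
                  List.mem_append, mem_ext_iff, hinv j, PySem.List.mem_pyRange_one]
                constructor
                · rintro (h | h)
                  · exact Or.inl h
                  · exact Or.inr ⟨hcov, h⟩
                · rintro (h | ⟨_, h⟩)
                  · exact Or.inl h
                  · exact Or.inr h
              · rw [if_neg (by tauto)]
                rw [List.filter_append, List.map_append, List.mem_append, mem_ext_iff, hinv j]
                constructor
                · exact Or.inl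
                · rintro (h | ⟨hcov', _⟩)
                  · exact h
                  · exact absurd hcov' hcov
            · rw [if_neg hspan, if_neg (by tauto)]
              exact hinv j

-- ===== VERDICT (by name: the statement is the Claim_ definition above) =====
theorem html_row_py_spec : Claim_equal_html_row_py := by
  intro row_list position_filled_list this_row number_of_cols row_ann_id_list _hdom _hpre
  show html_row_py _ _ _ _ _ = html_row_py_alt _ _ _ _ _
  unfold html_row_py html_row_py_alt
  have hinv0 : ∀ j : Int,
      j ∈ (PySem.Set.ofList
            ((position_filled_list.filter (fun p => p.1 == this_row)).map (·.2)) : PySem.Set Int)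
        ↔ j ∈ ((position_filled_list.filter (fun p => p.1 == this_row)).map (·.2)) :=
    fun j => PySem.Set.mem_ofList _ j
  exact congrArg (fun l => l ++ ["</tr>"])
    (loop_agree row_list this_row (PySem.List.pyRange 1 (number_of_cols + 1) 1) ["<tr>"]
      position_filled_list _ row_ann_id_list hinv0)
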